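-- pv_equiv track=rewrite | github.com/kolharsam/aoc | codejam/cj.py | place_into_string
-- ===== SOURCE A (Python) =====
-- def place_into_string(pat, choices, num):
--     i = 0
--     nstr = ""
--     for l in pat:
--         if l == '?':
--             nstr += choices[i]
--             i += 1
--         else:
--             nstr += l
--     return nstr
-- ===== SOURCE B (Python) =====
-- def place_into_string(pat, choices, num):
--     parts = pat.split('?')
--     pieces = [parts[0]]
--     for k, seg in enumerate(parts[1:]):
--         pieces.append(choices[k])
--         pieces.append(seg)
--     return ''.join(pieces)
-- ===== Notes on version B (the rewrite author's own statement) =====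
-- stated objective: faster
-- what changed: Replaces the char-by-char scan with an explicit placeholder counter and repeated string concatenation by split('?') into literal segments interleaved with the choices and joined once at the end.
import Mathlib
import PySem

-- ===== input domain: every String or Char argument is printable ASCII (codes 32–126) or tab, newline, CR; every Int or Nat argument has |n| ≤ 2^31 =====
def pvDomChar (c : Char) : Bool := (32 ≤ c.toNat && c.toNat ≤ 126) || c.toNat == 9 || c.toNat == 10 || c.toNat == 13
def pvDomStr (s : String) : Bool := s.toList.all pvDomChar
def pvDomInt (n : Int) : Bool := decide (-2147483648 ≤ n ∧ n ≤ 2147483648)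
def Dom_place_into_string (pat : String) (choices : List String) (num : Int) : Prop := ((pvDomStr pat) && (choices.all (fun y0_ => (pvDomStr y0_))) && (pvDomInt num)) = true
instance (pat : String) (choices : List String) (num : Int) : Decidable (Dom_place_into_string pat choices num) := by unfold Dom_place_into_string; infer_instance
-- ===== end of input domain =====

-- B replaces A's char-by-char scan (counter into choices, repeated concatenation) by
-- split('?') into literal segments interleaved with the choices and joined once (idiomatic).

-- ===== PORT A =====
-- A's loop: state (i, nstr); choices[i] is total here with default "" — Pre_ admits exactly
-- the inputs where the index is in range, i.e. where Python A returns.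
def pvLoopA (choices : List String) : List Char → Nat → List Char → List Char
  | [], _, acc => acc
  | c :: t, i, acc =>
    if c = '?' then pvLoopA choices t (i + 1) (acc ++ (choices.getD i "").toList)
    else pvLoopA choices t i (acc ++ [c])

def place_into_string (pat : String) (choices : List String) (num : Int) : String :=
  String.ofList (pvLoopA choices pat.toList 0 [])

-- ===== PORT B =====
def place_into_string_alt (pat : String) (choices : List String) (num : Int) : String :=
  let parts : List String := (PySem.Str.split? pat "?").getD []
  let pieces : List String := [PySem.List.pyGetD parts 0 ""]
  let pieces := (PySem.List.enumerate (PySem.List.slice parts (some 1) none)).foldl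
      (fun ps kv => ps ++ [PySem.List.pyGetD choices kv.1 ""] ++ [kv.2]) pieces
  PySem.Str.join "" pieces

-- ===== PRECONDITION & SPEC =====
-- Pre_ excludes exactly the inputs where Python A raises IndexError: more '?' in pat than
-- strings in choices (B raises there too).
def Pre_place_into_string (pat : String) (choices : List String) (num : Int) : Prop :=
  pat.toList.count '?' ≤ choices.length
instance (pat : String) (choices : List String) (num : Int) : Decidable (Pre_place_into_string pat choices num) := by unfold Pre_place_into_string; infer_instance

def pvWitness_place_into_string : String × List String × Int := ("a?b?c", ["XY", "Z"], 0)

def Spec_place_into_string (pat : String) (choices : List String) (num : Int) (out : String) : Prop := out = place_into_string_alt pat choices num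
instance (pat : String) (choices : List String) (num : Int) (out : String) : Decidable (Spec_place_into_string pat choices num out) := by unfold Spec_place_into_string; infer_instance

-- ===== CLAIM (what is proved, stated in full; the proofs are below) =====
def Claim_equal_place_into_string : Prop := ∀ (pat : String) (choices : List String) (num : Int), Dom_place_into_string pat choices num → Pre_place_into_string pat choices num → Spec_place_into_string pat choices num (place_into_string pat choices num)

-- ===== LEMMAS AND PROOFS =====

-- the functional core of splitting on '?'
def pvSplit : List Char → List Char → List (List Char)
  | pre, [] => [pre]
  | pre, c :: t => if c = '?' then pre :: pvSplit [] t else pvSplit (pre ++ [c]) t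

-- glue of split parts with choices starting at index i (the common semantics)
def pvGlueTail (choices : List String) : List (List Char) → Nat → List Char
  | [], _ => []
  | q :: qs, i => (choices.getD i "").toList ++ q ++ pvGlueTail choices qs (i + 1)

def pvGlue (choices : List String) : List (List Char) → Nat → List Char
  | [], _ => []
  | p :: qs, i => p ++ pvGlueTail choices qs i

lemma pvSplit_ne_nil : ∀ (t pre : List Char), ∃ q qs, pvSplit pre t = q :: qs := by
  intro t
  induction t with
  | nil => intro pre; exact ⟨pre, [], rfl⟩
  | cons c t ih =>
    intro pre
    by_cases h : c = '?'
    · exact ⟨pre, pvSplit [] t, by simp [pvSplit, h]⟩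
    · obtain ⟨q, qs, hq⟩ := ih (pre ++ [c])
      exact ⟨q, qs, by simp [pvSplit, h, hq]⟩

lemma pvLoopA_eq_glue (choices : List String) :
    ∀ (t : List Char) (i : Nat) (acc pre : List Char),
      pvLoopA choices t i (acc ++ pre) = acc ++ pvGlue choices (pvSplit pre t) i := by
  intro t
  induction t with
  | nil => intro i acc pre; simp [pvLoopA, pvSplit, pvGlue, pvGlueTail]
  | cons c t ih =>
    intro i acc pre
    by_cases h : c = '?'
    · obtain ⟨q, qs, hq⟩ := pvSplit_ne_nil t []
      have h1 := ih (i + 1) (acc ++ pre ++ (choices.getD i "").toList) []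
      simp only [List.append_nil] at h1
      simp only [hq, pvGlue, List.getD_eq_getElem?_getD, List.append_assoc] at h1
      simp [pvLoopA, h, pvSplit, hq, pvGlue, pvGlueTail, List.getD_eq_getElem?_getD,
        List.append_assoc, h1]
    · have := ih i acc (pre ++ [c])
      simp [pvLoopA, h, pvSplit, this]

-- splitOn.go for a single-char separator computes pvSplit
lemma splitOn_go_char :
    ∀ (l : List Char) (fuel : Nat) (cur : List Char) (acc : List (List Char)),
      l.length < fuel →
      PySem.Chars.splitOn.go ['?'] fuel l cur acc = acc.reverse ++ pvSplit cur.reverse l := by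
  intro l
  induction l with
  | nil =>
    intro fuel cur acc _
    cases fuel <;> simp [PySem.Chars.splitOn.go, pvSplit]
  | cons c t ih =>
    intro fuel cur acc hf
    cases fuel with
    | zero => omega
    | succ fuel =>
      have hf' : t.length < fuel := by simpa using hf
      by_cases h : c = '?'
      · have hrec := ih fuel [] (cur.reverse :: acc) hf'
        simp [PySem.Chars.splitOn.go, List.isPrefixOf, h, hrec, pvSplit]
      · have hrec := ih fuel (c :: cur) acc hf'
        simp [PySem.Chars.splitOn.go, List.isPrefixOf, h, Ne.symm h, hrec, pvSplit]

lemma splitOn_char (s : List Char) :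
    PySem.Chars.splitOn s ['?'] = pvSplit [] s := by
  have := splitOn_go_char s (s.length + 1) [] [] (by omega)
  simpa [PySem.Chars.splitOn] using this

-- the string pieces accumulated by B's loop
def pvStrTail (choices : List String) : List (List Char) → Nat → List String
  | [], _ => []
  | q :: qs, i => choices.getD i "" :: String.ofList q :: pvStrTail choices qs (i + 1)

lemma pvFoldB (choices : List String) :
    ∀ (qs : List (List Char)) (i : Nat) (ps : List String),
      (PySem.List.enumerate (qs.map String.ofList) (i : Int)).foldl
          (fun ps kv => ps ++ [PySem.List.pyGetD choices kv.1 ""] ++ [kv.2]) ps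
        = ps ++ pvStrTail choices qs i := by
  intro qs
  induction qs with
  | nil => intro i ps; simp [PySem.List.enumerate_nil, pvStrTail]
  | cons q qs ih =>
    intro i ps
    rw [List.map_cons, PySem.List.enumerate_cons, List.foldl_cons]
    have hcast : (i : Int) + 1 = ((i + 1 : Nat) : Int) := by push_cast; ring
    rw [hcast, ih (i + 1)]
    simp [pvStrTail, PySem.List.pyGetD_natCast, List.append_assoc]

lemma join_empty_toList :
    ∀ (l : List String), (PySem.Str.join "" l).toList = (l.map String.toList).flatten := by
  intro l
  induction l with
  | nil => simp [PySem.Str.join, PySem.Chars.join, List.intercalate]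
  | cons x l ih =>
    cases l with
    | nil => simp [PySem.Str.join, PySem.Chars.join, List.intercalate]
    | cons y l =>
      simp [PySem.Str.join, PySem.Chars.join, List.intercalate] at ih ⊢
      simpa using ih

lemma strTail_flatten (choices : List String) :
    ∀ (qs : List (List Char)) (i : Nat),
      ((pvStrTail choices qs i).map String.toList).flatten = pvGlueTail choices qs i := by
  intro qs
  induction qs with
  | nil => intro i; simp [pvStrTail, pvGlueTail]
  | cons q qs ih => intro i; simp [pvStrTail, pvGlueTail, ih (i + 1)]

lemma alt_toList (pat : String) (choices : List String) (num : Int) :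
    (place_into_string_alt pat choices num).toList
      = pvGlue choices (pvSplit [] pat.toList) 0 := by
  obtain ⟨p, qs, hpq⟩ := pvSplit_ne_nil pat.toList []
  have hsplit : PySem.Str.split? pat "?" = some ((pvSplit [] pat.toList).map String.ofList) := by
    simp [PySem.Str.split?, PySem.Chars.split?, splitOn_char]
  simp only [place_into_string_alt, hsplit, Option.getD_some]
  rw [hpq]
  have hslice : PySem.List.slice ((p :: qs).map String.ofList) (some 1) none
      = qs.map String.ofList := by
    simp [PySem.List.slice_from_one]
  simp only [List.map_cons] at hslice ⊢
  rw [PySem.List.pyGetD_zero_cons, hslice]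
  have hfold := pvFoldB choices qs 0 [String.ofList p]
  push_cast at hfold
  rw [hfold, join_empty_toList]
  simp [pvGlue, strTail_flatten]

-- ===== VERDICT (by name: the statement is the Claim_ definition above) =====
theorem place_into_string_spec : Claim_equal_place_into_string := by
  intro pat choices num _ _
  unfold Spec_place_into_string
  have h0 := pvLoopA_eq_glue choices pat.toList 0 [] []
  simp only [List.nil_append, List.append_nil] at h0
  have hA : place_into_string pat choices num
      = String.ofList (pvGlue choices (pvSplit [] pat.toList) 0) := by
    simp [place_into_string, h0]
  have hB := alt_toList pat choices num
  have hBeq : (place_into_string_alt pat choices num) = String.ofList (pvGlue choices (pvSplit [] pat.toList) 0) := by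
    apply String.toList_injective
    rw [hB]; simp
  rw [hA, hBeq]
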